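-- pv_equiv track=rewrite | github.com/Explik/c-simulator | rewriter/source_nodes.py | create_code_map
-- ===== SOURCE A (Python) =====
-- def create_code_map(code):
--     i = 0
--     buffer = [[], [-1]]
--
--     for c in code:
--         if c == '\n':
--             buffer[-1].append(i)
--             buffer.append([-1])
--         else:
--             buffer[-1].append(i)
--         i += 1
--     buffer[-1].append(i)
--
--     return buffer
-- ===== SOURCE B (Python) =====
-- def create_code_map(code):
--     buffer = [[]]
--     start = 0
--     for segment in code.split('\n'):
--         buffer.append([-1] + list(range(start, start + len(segment) + 1)))
--         start += len(segment) + 1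
--     return buffer
-- ===== Notes on version B (the rewrite author's own statement) =====
-- stated objective: simpler
-- what changed: B replaces A's per-character loop with per-'\n' branching by code.split('\n') plus one range() per line, building each row in one step from a running offset.
import Mathlib
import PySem

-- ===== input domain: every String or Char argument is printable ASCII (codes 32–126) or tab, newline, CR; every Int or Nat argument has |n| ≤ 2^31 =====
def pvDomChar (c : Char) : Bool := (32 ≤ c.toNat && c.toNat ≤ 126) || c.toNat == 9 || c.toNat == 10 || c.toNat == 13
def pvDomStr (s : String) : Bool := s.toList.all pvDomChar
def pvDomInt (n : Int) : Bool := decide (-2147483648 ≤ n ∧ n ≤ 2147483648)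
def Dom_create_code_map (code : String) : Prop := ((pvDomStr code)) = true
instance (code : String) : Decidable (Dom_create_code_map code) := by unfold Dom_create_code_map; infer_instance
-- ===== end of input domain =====

-- B builds each line's row in one step from code.split('\n') and a running offset instead of
-- A's per-character loop; same cost, simpler decomposition (objective: simpler).

-- ===== PORT A =====
-- buffer[-1].append(x): append x to the last list of the buffer
def pvAppendLast (b : List (List Int)) (x : Int) : List (List Int) :=
  match b with
  | [] => []
  | [l] => [l ++ [x]]
  | l :: t => l :: pvAppendLast t x

def create_code_map (code : String) : List (List Int) :=
  let st := code.toList.foldl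
    (fun (st : Int × List (List Int)) c =>
      if c = '\n' then (st.1 + 1, pvAppendLast st.2 st.1 ++ [[-1]])
      else (st.1 + 1, pvAppendLast st.2 st.1))
    ((0 : Int), [[], [-1]])
  pvAppendLast st.2 st.1

-- ===== PORT B =====
def create_code_map_alt (code : String) : List (List Int) :=
  let st := (PySem.Chars.splitOn code.toList ['\n']).foldl
    (fun (st : Int × List (List Int)) seg =>
      (st.1 + (seg.length : Int) + 1,
       st.2 ++ [[-1] ++ PySem.List.pyRange st.1 (st.1 + (seg.length : Int) + 1) 1]))
    ((0 : Int), [([] : List Int)])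
  st.2

-- ===== PRECONDITION & SPEC =====
def Spec_create_code_map (code : String) (out : List (List Int)) : Prop := out = create_code_map_alt code
instance (code : String) (out : List (List Int)) : Decidable (Spec_create_code_map code out) := by unfold Spec_create_code_map; infer_instance

-- ===== CLAIM (what is proved, stated in full; the proofs are below) =====
def Claim_equal_create_code_map : Prop := ∀ (code : String), Dom_create_code_map code → Spec_create_code_map code (create_code_map code)

-- ===== LEMMAS AND PROOFS =====

-- the sequence of finished rows A's loop (plus the trailing append) still produces from
-- position i with current row cur
def pvF : List Char → Int → List Int → List (List Int)
  | [], i, cur => [cur ++ [i]]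
  | c :: cs, i, cur =>
      if c = '\n' then (cur ++ [i]) :: pvF cs (i+1) [-1] else pvF cs (i+1) (cur ++ [i])

-- the rows B produces for a list of segments starting at offset i
def pvRows : List (List Char) → Int → List (List Int)
  | [], _ => []
  | s :: ss, i =>
      ([-1] ++ PySem.List.pyRange i (i + (s.length : Int) + 1) 1) :: pvRows ss (i + (s.length : Int) + 1)

-- reference version of PySem.Chars.splitOn on sep = ['\n'] with structural equations
def pvSplit : List Char → List Char → List (List Char)
  | [], cur => [cur.reverse]
  | c :: rest, cur => if c = '\n' then cur.reverse :: pvSplit rest [] else pvSplit rest (c :: cur)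

theorem pvSplit_cons_nl (cs : List Char) (cur : List Char) :
    pvSplit ('\n' :: cs) cur = cur.reverse :: pvSplit cs [] := by simp [pvSplit]

theorem pvSplit_cons {c : Char} (cs : List Char) (cur : List Char) (hc : c ≠ '\n') :
    pvSplit (c :: cs) cur = pvSplit cs (c :: cur) := by simp [pvSplit, hc]

theorem pvF_cons_nl (cs : List Char) (i : Int) (cur : List Int) :
    pvF ('\n' :: cs) i cur = (cur ++ [i]) :: pvF cs (i+1) [-1] := by simp [pvF]

theorem pvF_cons {c : Char} (cs : List Char) (i : Int) (cur : List Int) (hc : c ≠ '\n') :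
    pvF (c :: cs) i cur = pvF cs (i+1) (cur ++ [i]) := by simp [pvF, hc]

theorem pvSplit_go (fuel : Nat) : ∀ (l cur : List Char) (acc : List (List Char)),
    l.length < fuel →
    PySem.Chars.splitOn.go ['\n'] fuel l cur acc = acc.reverse ++ pvSplit l cur := by
  induction fuel with
  | zero => intro l cur acc h; omega
  | succ f ih =>
    intro l cur acc h
    match l with
    | [] => simp [PySem.Chars.splitOn.go, pvSplit]
    | c :: rest =>
      by_cases hc : c = '\n'
      · subst hc
        have hp : (['\n'].isPrefixOf ('\n' :: rest)) = true := by simp [List.isPrefixOf]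
        simp only [PySem.Chars.splitOn.go, hp, if_pos]
        rw [show List.drop ['\n'].length ('\n' :: rest) = rest from rfl]
        rw [ih rest [] (cur.reverse :: acc) (by simpa using Nat.lt_of_succ_lt_succ h)]
        rw [pvSplit_cons_nl]
        simp
      · have hp : (['\n'].isPrefixOf (c :: rest)) = false := by
          simpa [List.isPrefixOf] using Ne.symm hc
        simp only [PySem.Chars.splitOn.go, hp]
        rw [if_neg (by simp)]
        rw [ih rest (c :: cur) acc (by simpa using Nat.lt_of_succ_lt_succ h)]
        rw [pvSplit_cons _ _ hc]

theorem splitOn_eq_pvSplit (cs : List Char) :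
    PySem.Chars.splitOn cs ['\n'] = pvSplit cs [] := by
  unfold PySem.Chars.splitOn
  rw [pvSplit_go (cs.length + 1) cs [] [] (by omega)]
  simp

theorem pvAppendLast_append (done : List (List Int)) (cur : List Int) (x : Int) :
    pvAppendLast (done ++ [cur]) x = done ++ [cur ++ [x]] := by
  induction done with
  | nil => simp [pvAppendLast]
  | cons d ds ih =>
    match ds with
    | [] => simp [pvAppendLast]
    | e :: es => simpa [pvAppendLast] using ih

theorem foldA (cs : List Char) : ∀ (i : Int) (done : List (List Int)) (cur : List Int),
    (let st := cs.foldl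
        (fun (st : Int × List (List Int)) c =>
          if c = '\n' then (st.1 + 1, pvAppendLast st.2 st.1 ++ [[-1]])
          else (st.1 + 1, pvAppendLast st.2 st.1))
        (i, done ++ [cur])
     pvAppendLast st.2 st.1) = done ++ pvF cs i cur := by
  induction cs with
  | nil => intro i done cur; simp [pvF, pvAppendLast_append]
  | cons c cs ih =>
    intro i done cur
    by_cases hc : c = '\n'
    · subst hc
      simp only [List.foldl_cons, if_true]
      rw [pvAppendLast_append, pvF_cons_nl,
        show done ++ ((cur ++ [i]) :: pvF cs (i+1) [-1])
            = (done ++ [cur ++ [i]]) ++ pvF cs (i+1) [-1] by simp]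
      exact ih (i + 1) (done ++ [cur ++ [i]]) [-1]
    · simp only [List.foldl_cons]
      rw [if_neg hc, pvAppendLast_append, pvF_cons _ _ _ hc]
      exact ih (i + 1) done (cur ++ [i])

theorem A_eq (code : String) :
    create_code_map code = [] :: pvF code.toList 0 [-1] := by
  have := foldA code.toList 0 [[]] [-1]
  simpa [create_code_map] using this

theorem foldB (segs : List (List Char)) : ∀ (i : Int) (done : List (List Int)),
    (segs.foldl
      (fun (st : Int × List (List Int)) seg =>
        (st.1 + (seg.length : Int) + 1,
         st.2 ++ [[-1] ++ PySem.List.pyRange st.1 (st.1 + (seg.length : Int) + 1) 1]))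
      (i, done)).2 = done ++ pvRows segs i := by
  induction segs with
  | nil => intro i done; simp [pvRows]
  | cons s ss ih =>
    intro i done
    simp only [List.foldl_cons]
    have h2 : done ++ pvRows (s :: ss) i
        = (done ++ [[-1] ++ PySem.List.pyRange i (i + (s.length : Int) + 1) 1])
            ++ pvRows ss (i + (s.length : Int) + 1) := by
      simp [pvRows]
    rw [h2]
    exact ih (i + (s.length : Int) + 1)
      (done ++ [[-1] ++ PySem.List.pyRange i (i + (s.length : Int) + 1) 1])

theorem B_eq (code : String) :
    create_code_map_alt code = [] :: pvRows (pvSplit code.toList []) 0 := by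
  show ((PySem.Chars.splitOn code.toList ['\n']).foldl _ ((0 : Int), [([] : List Int)])).2 = _
  rw [splitOn_eq_pvSplit, foldB]
  rfl

theorem pvF_eq_pvRows (cs : List Char) : ∀ (cur : List Char) (i : Int),
    pvF cs i ([-1] ++ PySem.List.pyRange (i - cur.length) i 1)
      = pvRows (pvSplit cs cur) (i - cur.length) := by
  induction cs with
  | nil =>
    intro cur i
    have h1 : (i - (cur.length : Int)) ≤ i := by omega
    have h2 : i - (cur.length : Int) + ((cur.reverse.length : Int)) + 1 = i + 1 := by
      simp only [List.length_reverse]; omega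
    show [([-1] ++ PySem.List.pyRange (i - cur.length) i 1) ++ [i]] = pvRows [cur.reverse] _
    simp only [pvRows, h2]
    rw [List.append_assoc, ← PySem.List.pyRange_one_succ_right h1]
  | cons c cs ih =>
    intro cur i
    have h1 : (i - (cur.length : Int)) ≤ i := by omega
    by_cases hc : c = '\n'
    · subst hc
      have h2 : i - (cur.length : Int) + ((cur.reverse.length : Int)) + 1 = i + 1 := by
        simp only [List.length_reverse]; omega
      rw [pvF_cons_nl, pvSplit_cons_nl]
      have h3 := ih [] (i + 1)
      simp only [List.length_nil, Nat.cast_zero, sub_zero, PySem.List.pyRange_one_eq_nil (le_refl (i+1)),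
        List.append_nil] at h3
      rw [h3]
      simp only [pvRows, h2]
      rw [List.append_assoc, ← PySem.List.pyRange_one_succ_right h1]
    · rw [pvF_cons _ _ _ hc, pvSplit_cons _ _ hc]
      have h3 := ih (c :: cur) (i + 1)
      have h4 : (i + 1 - (((c :: cur).length : Nat) : Int)) = i - cur.length := by
        simp only [List.length_cons]; push_cast; omega
      rw [h4] at h3
      rw [← h3]
      congr 1
      rw [List.append_assoc, ← PySem.List.pyRange_one_succ_right h1]

-- ===== VERDICT (by name: the statement is the Claim_ definition above) =====
theorem create_code_map_spec : Claim_equal_create_code_map := by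
  intro code _
  unfold Spec_create_code_map
  rw [A_eq, B_eq]
  have := pvF_eq_pvRows code.toList [] 0
  simpa [PySem.List.pyRange_one_eq_nil] using this
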